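-- pv_equiv track=rewrite | github.com/nharrisonau/R-Diff | targets/benign/scripts/generate_lists.py | unique_version
-- ===== SOURCE A (Python) =====
-- def unique_version(base_version: str, used: set[str]) -> str:
--     if base_version not in used:
--         used.add(base_version)
--         return base_version
--     idx = 2
--     while f"{base_version}__{idx}" in used:
--         idx += 1
--     version = f"{base_version}__{idx}"
--     used.add(version)
--     return version
-- ===== SOURCE B (Python) =====
-- def unique_version(base_version: str, used: set[str]) -> str:
--     # Different algorithm: instead of probing candidate names one by one,
--     # parse the canonical numeric suffixes already present in `used`, sort
--     # them, and find the smallest free index >= 2 by one scan of the sorted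
--     # list.  Only the returned name is added to `used`.
--     if base_version not in used:
--         used.add(base_version)
--         return base_version
--     prefix = base_version + "__"
--     taken = sorted(k for k in map(lambda s: _canon_suffix(s, prefix), used)
--                    if k is not None)
--     idx = 2
--     for k in taken:
--         if k == idx:
--             idx += 1
--         elif k > idx:
--             break
--     version = prefix + str(idx)
--     used.add(version)
--     return version
--
--
-- def _canon_suffix(s: str, prefix: str):
--     # The non-negative integer k such that s == prefix + str(k) written in
--     # canonical decimal (digits only, no leading zero), else None.
--     if not s.startswith(prefix):
--         return None
--     t = s[len(prefix):]
--     if not t or (len(t) > 1 and t[0] == "0"):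
--         return None
--     k = 0
--     for ch in t:
--         if not ("0" <= ch <= "9"):
--             return None
--         k = 10 * k + (ord(ch) - ord("0"))
--     return k
-- ===== Notes on version B (the rewrite author's own statement) =====
-- stated objective: alternative
-- what changed: Replaces A's linear probing of candidate names (base__2, base__3, ... tested one by one against used) by a data-driven pass: parse the canonical numeric suffixes already present in used, sort them, and obtain the smallest free index >= 2 by a single scan of the sorted list.
import Mathlib
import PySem

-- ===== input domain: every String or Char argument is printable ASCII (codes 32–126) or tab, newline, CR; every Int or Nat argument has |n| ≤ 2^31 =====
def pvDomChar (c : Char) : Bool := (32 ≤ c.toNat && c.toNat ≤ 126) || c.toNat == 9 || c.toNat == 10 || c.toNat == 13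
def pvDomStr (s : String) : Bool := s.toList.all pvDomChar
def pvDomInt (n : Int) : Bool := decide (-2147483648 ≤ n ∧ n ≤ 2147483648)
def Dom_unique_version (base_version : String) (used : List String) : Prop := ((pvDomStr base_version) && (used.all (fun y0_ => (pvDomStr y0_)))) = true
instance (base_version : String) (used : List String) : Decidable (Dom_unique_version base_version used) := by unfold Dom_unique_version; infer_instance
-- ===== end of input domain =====

-- B replaces A's linear probing of candidate names by a data-driven pass: it parses
-- the canonical numeric suffixes already present in `used`, sorts them, and finds the
-- smallest free index ≥ 2 by one scan of the sorted list (alternative algorithm).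
-- Both Pythons add the returned string to `used`; that identical mutation is not part
-- of the proved statement, which is about the RETURN value.

-- ===== PORT A =====
-- A's while-loop, fueled; fuel used.length + 1 is enough for the loop to exit
-- (the fuel-0 fallback still mirrors `version = f"{base}__{idx}"`).
def uvLoopA (base : String) (used : List String) (idx : Int) : Nat → String
  | 0 => base ++ "__" ++ PySem.Int.toStr idx
  | fuel + 1 =>
    if (base ++ "__" ++ PySem.Int.toStr idx) ∈ used then
      uvLoopA base used (idx + 1) fuel
    else
      base ++ "__" ++ PySem.Int.toStr idx

def unique_version (base_version : String) (used : List String) : String :=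
  if base_version ∉ used then
    base_version
  else
    uvLoopA base_version used 2 (used.length + 1)

-- ===== PORT B =====
-- digit loop of _canon_suffix: k = 10*k + (ord(ch) - ord('0')), None on a non-digit
def uvParseGo (k : Int) : List Char → Option Int
  | [] => some k
  | c :: cs =>
    if '0' ≤ c ∧ c ≤ '9' then uvParseGo (10 * k + ((c.toNat : Int) - 48)) cs else none

-- _canon_suffix(s, prefix): the n with s == prefix + str(n) in canonical decimal
-- guard `if not t or (len(t) > 1 and t[0] == "0")` plus the digit loop on t
def uvCheck (t : List Char) : Option Int :=
  if t = [] ∨ (1 < t.length ∧ t.headD ' ' = '0') then none else uvParseGo 0 t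

def uvCanonSuffix (pfx : String) (s : String) : Option Int :=
  if PySem.Str.startswith s pfx then
    uvCheck (s.toList.drop pfx.toList.length)    -- t = s[len(prefix):]
  else none

-- the for-loop over the sorted taken list; `break` returns idx
def uvScan : List Int → Int → Int
  | [], idx => idx
  | k :: ks, idx =>
    if k == idx then uvScan ks (idx + 1)
    else if idx < k then idx
    else uvScan ks idx

def unique_version_alt (base_version : String) (used : List String) : String :=
  if base_version ∉ used then
    base_version
  else
    let pfx := base_version ++ "__"
    let taken := PySem.List.sorted (used.filterMap (uvCanonSuffix pfx)) (fun x => x) false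
    pfx ++ PySem.Int.toStr (uvScan taken 2)

-- ===== PRECONDITION & SPEC =====
def Spec_unique_version (base_version : String) (used : List String) (out : String) : Prop := out = unique_version_alt base_version used
instance (base_version : String) (used : List String) (out : String) : Decidable (Spec_unique_version base_version used out) := by unfold Spec_unique_version; infer_instance

-- ===== CLAIM (what is proved, stated in full; the proofs are below) =====
def Claim_equal_unique_version : Prop := ∀ (base_version : String) (used : List String), Dom_unique_version base_version used → Spec_unique_version base_version used (unique_version base_version used)

-- ===== LEMMAS AND PROOFS =====

-- digitChar facts
theorem uv_digitChar_toNat {d : Nat} (h : d < 10) : (Nat.digitChar d).toNat = 48 + d := by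
  interval_cases d <;> decide

theorem uv_digitChar_isdig {d : Nat} (h : d < 10) :
    '0' ≤ Nat.digitChar d ∧ Nat.digitChar d ≤ '9' := by
  interval_cases d <;> decide

theorem uv_digitChar_of_char {c : Char} (h0 : '0' ≤ c) (h9 : c ≤ '9') :
    Nat.digitChar (c.toNat - 48) = c := by
  have hlo : 48 ≤ c.toNat := Nat.succ_le_of_lt h0
  have hhi : c.toNat ≤ 57 := h9
  have hd : c.toNat - 48 < 10 := by omega
  apply Char.ext
  apply UInt32.toNat_inj.mp
  show (Nat.digitChar (c.toNat - 48)).toNat = c.toNat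
  rw [uv_digitChar_toNat hd]
  omega

-- uvParseGo over an append
theorem uvParseGo_append (xs ys : List Char) (a : Int) :
    uvParseGo a (xs ++ ys) = (uvParseGo a xs).bind (fun k => uvParseGo k ys) := by
  induction xs generalizing a with
  | nil => simp [uvParseGo]
  | cons c cs ih =>
    simp only [List.cons_append, uvParseGo]
    split
    · exact ih _
    · rfl

-- round trip: the digit loop recovers n from str(n)
theorem uvParseGo_toDigits (n : Nat) : uvParseGo 0 (Nat.toDigits 10 n) = some (n : Int) := by
  induction n using Nat.strong_induction_on with
  | _ n ih =>
    by_cases h : n < 10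
    · rw [Nat.toDigits_of_lt_base h]
      obtain ⟨h0, h9⟩ := uv_digitChar_isdig h
      have hand : '0' ≤ n.digitChar ∧ n.digitChar ≤ '9' := ⟨h0, h9⟩
      have ht := uv_digitChar_toNat h
      simp only [uvParseGo, if_pos hand, ht, Option.some.injEq]
      push_cast
      ring
    · rw [Nat.toDigits_of_base_le (by norm_num) (Nat.le_of_not_lt h)]
      rw [uvParseGo_append, ih (n / 10) (by omega)]
      have hd : n % 10 < 10 := Nat.mod_lt _ (by norm_num)
      obtain ⟨h0, h9⟩ := uv_digitChar_isdig hd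
      have hand : '0' ≤ (n % 10).digitChar ∧ (n % 10).digitChar ≤ '9' := ⟨h0, h9⟩
      have ht := uv_digitChar_toNat hd
      simp only [Option.bind_some, uvParseGo, if_pos hand, ht, Option.some.injEq]
      push_cast
      omega

-- str(n) has no leading zero for n > 0
theorem uv_toDigits_head_ne_zero {n : Nat} (hn : 0 < n) {c : Char} {cs : List Char}
    (h : Nat.toDigits 10 n = c :: cs) : c ≠ '0' := by
  induction n using Nat.strong_induction_on generalizing c cs with
  | _ n ih =>
    by_cases hlt : n < 10
    · rw [Nat.toDigits_of_lt_base hlt] at h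
      injection h with h1 _
      rw [← h1]
      interval_cases n <;> decide
    · rw [Nat.toDigits_of_base_le (by norm_num) (Nat.le_of_not_lt hlt)] at h
      have hpos : (Nat.toDigits 10 (n / 10)).length ≠ 0 :=
        Nat.pos_iff_ne_zero.mp Nat.length_toDigits_pos
      obtain ⟨c', cs', hcc⟩ := List.exists_cons_of_ne_nil
        (l := Nat.toDigits 10 (n / 10)) (by
          intro hnil; exact hpos (by rw [hnil]; rfl))
      rw [hcc, List.cons_append] at h
      have hc : c = c' := by injection h with h1 _; exact h1.symm
      exact hc ▸ ih (n / 10) (by omega) (by omega) hcc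

-- soundness: an accepted suffix IS str(n) for its value n
theorem uvParseGo_sound (t : List Char) :
    t ≠ [] → (∀ c cs, t = c :: cs → cs ≠ [] → c ≠ '0') →
    ∀ v : Int, uvParseGo 0 t = some v → ∃ n : Nat, v = (n : Int) ∧ t = Nat.toDigits 10 n := by
  induction t using List.reverseRecOn with
  | nil => intro hne; exact absurd rfl hne
  | append_singleton xs c ihx =>
    intro _ hlz v h
    rw [uvParseGo_append] at h
    cases hxs : uvParseGo 0 xs with
    | none => rw [hxs] at h; simp at h
    | some w =>
      rw [hxs] at h
      simp only [Option.bind_some] at h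
      by_cases hdig : '0' ≤ c ∧ c ≤ '9'
      · have hv : v = 10 * w + ((c.toNat : Int) - 48) := by
          simp only [uvParseGo, if_pos hdig, Option.some.injEq] at h
          omega
        have hlo : 48 ≤ c.toNat := Nat.succ_le_of_lt hdig.1
        have hhi : c.toNat ≤ 57 := hdig.2
        by_cases hxsnil : xs = []
        · subst hxsnil
          have hw : w = 0 := by simp [uvParseGo] at hxs; omega
          refine ⟨c.toNat - 48, by omega, ?_⟩
          rw [Nat.toDigits_of_lt_base (by omega), uv_digitChar_of_char hdig.1 hdig.2]
          rfl
        · obtain ⟨x, xs', rfl⟩ := List.exists_cons_of_ne_nil hxsnil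
          have hx0 : x ≠ '0' := hlz x (xs' ++ [c]) rfl (by simp)
          obtain ⟨m, rfl, hxseq⟩ := ihx hxsnil (fun c0 cs0 hc0 _ => by
            injection hc0 with h1 _; exact h1 ▸ hx0) w hxs
          have hmpos : 0 < m := by
            rcases Nat.eq_zero_or_pos m with hm0 | hm0
            · exfalso
              rw [hm0, Nat.toDigits_of_lt_base (by norm_num)] at hxseq
              injection hxseq with h1 _
              exact hx0 (by rw [h1]; rfl)
            · exact hm0
          refine ⟨10 * m + (c.toNat - 48), by rw [hv]; push_cast; omega, ?_⟩
          rw [← Nat.toDigits_append_toDigits (b := 10) (n := m) (d := c.toNat - 48)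
                (by norm_num) hmpos (by omega),
              Nat.toDigits_of_lt_base (show c.toNat - 48 < 10 by omega), ← hxseq,
              uv_digitChar_of_char hdig.1 hdig.2]
      · simp [uvParseGo, hdig] at h

-- full characterisation of the guard + digit loop
theorem uvCheck_eq_some_iff (t : List Char) (v : Int) :
    uvCheck t = some v ↔ ∃ n : Nat, v = (n : Int) ∧ t = Nat.toDigits 10 n := by
  unfold uvCheck
  constructor
  · intro h
    by_cases hg : t = [] ∨ (1 < t.length ∧ t.headD ' ' = '0')
    · rw [if_pos hg] at h; exact absurd h (by simp)
    · rw [if_neg hg] at h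
      push Not at hg
      obtain ⟨hne, hlz⟩ := hg
      exact uvParseGo_sound t hne (fun c cs hc0 hcs0 hc00 => by
        have hlen : 1 < t.length := by rw [hc0]; simp [List.length_pos_iff.mpr hcs0]
        have : t.headD ' ' = '0' := by rw [hc0, hc00]; rfl
        exact absurd this (hlz hlen)) v h
  · rintro ⟨n, rfl, rfl⟩
    have hne : Nat.toDigits 10 n ≠ [] := by
      intro hnil
      exact (Nat.pos_iff_ne_zero.mp (Nat.length_toDigits_pos (b := 10) (n := n)))
        (by rw [hnil]; rfl)
    have hg : ¬ (Nat.toDigits 10 n = [] ∨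
        (1 < (Nat.toDigits 10 n).length ∧ (Nat.toDigits 10 n).headD ' ' = '0')) := by
      push Not
      refine ⟨hne, fun hlen h0 => ?_⟩
      obtain ⟨c, cs, hcc⟩ := List.exists_cons_of_ne_nil hne
      have hc0 : c = '0' := by rw [hcc] at h0; exact h0
      rcases Nat.eq_zero_or_pos n with h0' | h0'
      · rw [h0', Nat.toDigits_of_lt_base (show (0:Nat) < 10 by norm_num)] at hcc hlen
        simp at hlen
      · exact uv_toDigits_head_ne_zero h0' hcc hc0
    rw [if_neg hg]
    exact uvParseGo_toDigits n

-- full characterisation of the parse helper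
theorem uvCanonSuffix_eq_some_iff (pfx s : String) (v : Int) :
    uvCanonSuffix pfx s = some v ↔
      ∃ n : Nat, v = (n : Int) ∧ s.toList = pfx.toList ++ Nat.toDigits 10 n := by
  unfold uvCanonSuffix
  constructor
  · intro h
    by_cases hsw : PySem.Str.startswith s pfx = true
    · rw [if_pos hsw] at h
      have hpre : pfx.toList <+: s.toList := by
        rw [PySem.Str.startswith_eq] at hsw
        exact (PySem.Chars.startswith_iff _ _).mp hsw
      obtain ⟨rest, hrest⟩ := hpre
      have hdrop : s.toList.drop pfx.toList.length = rest := by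
        rw [← hrest]; exact List.drop_left
      rw [hdrop] at h
      obtain ⟨n, hn, heq⟩ := (uvCheck_eq_some_iff rest v).mp h
      exact ⟨n, hn, by rw [← hrest, heq]⟩
    · rw [if_neg hsw] at h; exact absurd h (by simp)
  · rintro ⟨n, rfl, hs⟩
    have hsw : PySem.Str.startswith s pfx = true := by
      rw [PySem.Str.startswith_eq]
      exact (PySem.Chars.startswith_iff _ _).mpr ⟨Nat.toDigits 10 n, hs.symm⟩
    rw [if_pos hsw]
    have hdrop : s.toList.drop pfx.toList.length = Nat.toDigits 10 n := by
      rw [hs]; exact List.drop_left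
    rw [hdrop]
    exact (uvCheck_eq_some_iff _ _).mpr ⟨n, rfl, rfl⟩

-- membership in the parsed-suffix list = membership of the candidate name
theorem uv_mem_filterMap_iff (pfx : String) (used : List String) (n : Nat) :
    ((n : Int) ∈ used.filterMap (uvCanonSuffix pfx)) ↔
      (pfx ++ PySem.Int.toStr (n : Int)) ∈ used := by
  have hcand : ∀ s : String, uvCanonSuffix pfx s = some (n : Int) ↔
      s = pfx ++ PySem.Int.toStr (n : Int) := by
    intro s
    rw [uvCanonSuffix_eq_some_iff]
    constructor
    · rintro ⟨m, hm, hs⟩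
      have hmn : m = n := by exact_mod_cast hm.symm
      subst hmn
      apply String.toList_inj.mp
      rw [String.toList_append, PySem.Int.toList_toStr, hs]
      congr 1
    · rintro rfl
      refine ⟨n, rfl, ?_⟩
      rw [String.toList_append, PySem.Int.toList_toStr]
      congr 1
  constructor
  · intro h
    obtain ⟨s, hs, hsome⟩ := List.mem_filterMap.mp h
    exact (hcand s).mp hsome ▸ hs
  · intro h
    exact List.mem_filterMap.mpr ⟨_, h, (hcand _).mpr rfl⟩

-- uvScan bounds and specification on a sorted list
theorem uvScan_ge (L : List Int) (idx : Int) : idx ≤ uvScan L idx := by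
  induction L generalizing idx with
  | nil => simp [uvScan]
  | cons k ks ih =>
    simp only [uvScan]
    split
    · exact le_trans (by omega) (ih (idx + 1))
    · split
      · exact le_refl _
      · exact ih idx

theorem uvScan_le (L : List Int) (idx : Int) : uvScan L idx ≤ idx + L.length := by
  induction L generalizing idx with
  | nil => simp [uvScan]
  | cons k ks ih =>
    simp only [uvScan, List.length_cons]
    split
    · have := ih (idx + 1); push_cast; omega
    · split
      · push_cast; omega
      · have := ih idx; push_cast; omega

theorem uvScan_not_mem (L : List Int) (idx : Int) (hs : L.Pairwise (· ≤ ·)) :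
    uvScan L idx ∉ L := by
  induction L generalizing idx with
  | nil => simp
  | cons k ks ih =>
    rcases List.pairwise_cons.mp hs with ⟨hk, hks⟩
    simp only [uvScan, List.mem_cons]
    split
    · rename_i heq
      have hk' : k = idx := by simpa using heq
      have h1 := ih (idx + 1) hks
      have h2 := uvScan_ge ks (idx + 1)
      rintro (h | h)
      · omega
      · exact h1 h
    · rename_i hne
      have hne' : k ≠ idx := by simpa using hne
      split
      · rename_i hlt
        rintro (h | h)
        · omega
        · have := hk _ h; omega
      · rename_i hge
        have h1 := ih idx hks
        have h2 := uvScan_ge ks idx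
        rintro (h | h)
        · omega
        · exact h1 h

theorem uvScan_min (L : List Int) (idx : Int) (hs : L.Pairwise (· ≤ ·)) :
    ∀ j : Int, idx ≤ j → j < uvScan L idx → j ∈ L := by
  induction L generalizing idx with
  | nil => intro j h1 h2; simp [uvScan] at h2; omega
  | cons k ks ih =>
    rcases List.pairwise_cons.mp hs with ⟨hk, hks⟩
    intro j h1 h2
    simp only [uvScan] at h2
    split at h2
    · rename_i heq
      have hk' : k = idx := by simpa using heq
      rcases eq_or_lt_of_le h1 with h | h
      · exact List.mem_cons.mpr (Or.inl (by omega))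
      · exact List.mem_cons.mpr (Or.inr (ih (idx + 1) hks j (by omega) h2))
    · rename_i hne
      split at h2
      · omega
      · exact List.mem_cons.mpr (Or.inr (ih idx hks j h1 h2))

-- A's probe loop returns the candidate at the least free index
theorem uvLoopA_eq (base : String) (used : List String) :
    ∀ (fuel : Nat) (idx m : Int), idx ≤ m →
      (base ++ "__" ++ PySem.Int.toStr m) ∉ used →
      (∀ j : Int, idx ≤ j → j < m → (base ++ "__" ++ PySem.Int.toStr j) ∈ used) →
      m - idx ≤ (fuel : Int) →
      uvLoopA base used idx fuel = base ++ "__" ++ PySem.Int.toStr m := by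
  intro fuel
  induction fuel with
  | zero =>
    intro idx m h1 _ _ h4
    have : m = idx := by simpa using by omega
    simp [uvLoopA, this]
  | succ n ih =>
    intro idx m h1 h2 h3 h4
    simp only [uvLoopA]
    split
    · rename_i hin
      have hne : idx ≠ m := fun h => h2 (h ▸ hin)
      exact ih (idx + 1) m (by omega) h2 (fun j hj1 hj2 => h3 j (by omega) hj2) (by push_cast at h4 ⊢; omega)
    · rename_i hout
      have : m = idx := by
        rcases eq_or_lt_of_le h1 with h | h
        · omega
        · exact absurd (h3 idx le_rfl h) hout
      rw [this]

-- ===== VERDICT (by name: the statement is the Claim_ definition above) =====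
theorem unique_version_spec : Claim_equal_unique_version := by
  intro base used _
  unfold Spec_unique_version unique_version unique_version_alt
  by_cases hmem : base ∈ used
  · rw [if_neg (not_not_intro hmem), if_neg (not_not_intro hmem)]
    show uvLoopA base used 2 (used.length + 1) =
      (base ++ "__") ++ PySem.Int.toStr (uvScan
        (PySem.List.sorted ((used.filterMap (uvCanonSuffix (base ++ "__")))) (fun x => x) false) 2)
    set pfx := base ++ "__" with hpfx
    set tk := PySem.List.sorted (used.filterMap (uvCanonSuffix pfx)) (fun x => x) false with htk
    set m := uvScan tk 2 with hm
    have hpair : tk.Pairwise (· ≤ ·) := PySem.List.sorted_pairwise _ _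
    have h2m : 2 ≤ m := uvScan_ge _ _
    have hmtk : ∀ j : Int, (j ∈ tk) ↔ j ∈ used.filterMap (uvCanonSuffix pfx) := by
      intro j; rw [htk, PySem.List.mem_sorted]
    have hnot : pfx ++ PySem.Int.toStr m ∉ used := by
      intro hin
      have hm' : ((m.toNat : Nat) : Int) = m := Int.toNat_of_nonneg (by omega)
      rw [← hm'] at hin
      have h1 := (uv_mem_filterMap_iff pfx used m.toNat).mpr hin
      rw [← hmtk, hm'] at h1
      exact uvScan_not_mem tk 2 hpair h1
    have hall : ∀ j : Int, 2 ≤ j → j < m → pfx ++ PySem.Int.toStr j ∈ used := by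
      intro j hj1 hj2
      have hj' : ((j.toNat : Nat) : Int) = j := Int.toNat_of_nonneg (by omega)
      have h1 : j ∈ tk := uvScan_min tk 2 hpair j hj1 hj2
      rw [← hj'] at h1 ⊢
      exact (uv_mem_filterMap_iff pfx used j.toNat).mp ((hmtk _).mp h1)
    have hfuel : m - 2 ≤ ((used.length + 1 : Nat) : Int) := by
      have h1 := uvScan_le tk 2
      have h2 : tk.length = (used.filterMap (uvCanonSuffix pfx)).length := by
        rw [htk, PySem.List.length_sorted]
      have h3 : (used.filterMap (uvCanonSuffix pfx)).length ≤ used.length :=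
        List.length_filterMap_le _ _
      push_cast
      omega
    exact uvLoopA_eq base used (used.length + 1) 2 m h2m hnot hall hfuel
  · rw [if_pos hmem, if_pos hmem]
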